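-- pv_equiv track=rewrite | github.com/Michawl1/EECS397_Python | Assignment3/assignment3.py | store_checkout
-- ===== SOURCE A (Python) =====
-- def store_checkout(inventory_tuple_list, item_purchase_list):
--     """
--         inventory_tuple_list:
--             A list of tuples. Each tuple has a string representing an
--             item name, an int representing a price, and a string representing
--             a description.
--
--             Example: [("A", 5, "shiny new A"), ("B", 10, "big heavy B")]
--
--
--         item_purchase_list:
--             A list of strings. Each string represents an item name.
--
--             Example: ["A", "A", "B", "C"]
--
--
--         Return the total price of the items in item_purchase_list by using
--         prices from the provided inventory_tuple_list. If an item does not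
--         have a price, it is free. The descriptions are extra, useless
--         information for this function.
--
--         The example inputs here would have a total cost of:
--         5 + 5 + 10 + 0 = 20
--     """
--     total = 0
--     pricing_dictionary = {}
--     for tuple in inventory_tuple_list:
--         pricing_dictionary[tuple[0]] = tuple[1]
--
--     for purchase_item in item_purchase_list:
--         if pricing_dictionary.__contains__(purchase_item):
--             total += pricing_dictionary[purchase_item]
--
--     return total
-- ===== SOURCE B (Python) =====
-- def store_checkout(inventory_tuple_list, item_purchase_list):
--     # Iterate over the INVENTORY (reversed, so the last tuple for a name wins),
--     # adding price * multiplicity of that name in the purchases; items with no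
--     # inventory entry contribute 0 automatically.
--     total = 0
--     seen = set()
--     for name, price, _desc in reversed(inventory_tuple_list):
--         if name not in seen:
--             seen.add(name)
--             total += price * item_purchase_list.count(name)
--     return total
-- ===== Notes on version B (the rewrite author's own statement) =====
-- stated objective: alternative
-- what changed: Instead of pricing each purchase via a dictionary, B traverses the inventory (reversed, first-seen name wins = A's last-write-wins) and adds each name's price times its multiplicity in the purchase list, so no per-purchase lookup happens at all.
import Mathlib
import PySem

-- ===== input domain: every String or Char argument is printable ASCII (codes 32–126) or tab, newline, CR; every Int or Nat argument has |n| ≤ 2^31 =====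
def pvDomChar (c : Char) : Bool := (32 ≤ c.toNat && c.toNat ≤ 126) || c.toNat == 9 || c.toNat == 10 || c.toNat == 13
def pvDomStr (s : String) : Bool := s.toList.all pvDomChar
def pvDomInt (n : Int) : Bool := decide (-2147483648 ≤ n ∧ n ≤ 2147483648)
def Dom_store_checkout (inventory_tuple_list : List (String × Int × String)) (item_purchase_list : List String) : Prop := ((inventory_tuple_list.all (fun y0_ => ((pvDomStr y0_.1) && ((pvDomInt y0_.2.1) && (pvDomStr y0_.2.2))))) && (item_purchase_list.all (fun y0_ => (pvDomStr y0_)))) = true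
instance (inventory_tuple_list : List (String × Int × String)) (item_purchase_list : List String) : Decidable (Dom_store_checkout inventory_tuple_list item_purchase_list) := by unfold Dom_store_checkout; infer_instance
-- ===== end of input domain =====

-- B inverts the traversal: instead of pricing each purchase through a dictionary, it walks the
-- inventory reversed (first-seen name = A's last-write-wins) and adds price * multiplicity of that
-- name among the purchases. Objective: alternative (same result, genuinely different algorithm).

-- ===== PORT A =====
def store_checkout (inventory_tuple_list : List (String × Int × String)) (item_purchase_list : List String) : Int :=
  let pricing_dictionary : PySem.Dict String Int :=
    inventory_tuple_list.foldl (fun d t => d.insert t.1 t.2.1) PySem.Dict.empty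
  item_purchase_list.foldl
    (fun total purchase_item =>
      if pricing_dictionary.contains purchase_item then
        total + pricing_dictionary.getD purchase_item 0
      else total) 0

-- ===== PORT B =====
def store_checkout_alt (inventory_tuple_list : List (String × Int × String)) (item_purchase_list : List String) : Int :=
  (inventory_tuple_list.reverse.foldl
    (fun st t =>
      if st.1.contains t.1 then st
      else (st.1.add t.1, st.2 + t.2.1 * (item_purchase_list.count t.1 : Int)))
    ((PySem.Set.empty : PySem.Set String), (0 : Int))).2

-- ===== PRECONDITION & SPEC =====
def Spec_store_checkout (inventory_tuple_list : List (String × Int × String)) (item_purchase_list : List String) (out : Int) : Prop := out = store_checkout_alt inventory_tuple_list item_purchase_list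
instance (inventory_tuple_list : List (String × Int × String)) (item_purchase_list : List String) (out : Int) : Decidable (Spec_store_checkout inventory_tuple_list item_purchase_list out) := by unfold Spec_store_checkout; infer_instance

-- ===== CLAIM (what is proved, stated in full; the proofs are below) =====
def Claim_equal_store_checkout : Prop := ∀ (inventory_tuple_list : List (String × Int × String)) (item_purchase_list : List String), Dom_store_checkout inventory_tuple_list item_purchase_list → Spec_store_checkout inventory_tuple_list item_purchase_list (store_checkout inventory_tuple_list item_purchase_list)

-- ===== LEMMAS AND PROOFS =====

-- first match scanning `rev`, falling back to `init`
def fpriceD (rev : List (String × Int × String)) (p : String) (init : Int) : Int :=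
  match rev with
  | [] => init
  | t :: r => if t.1 == p then t.2.1 else fpriceD r p init

theorem fpriceD_append_single (a : List (String × Int × String)) (t : String × Int × String)
    (p : String) (init : Int) :
    fpriceD (a ++ [t]) p init = fpriceD a p (if t.1 == p then t.2.1 else init) := by
  induction a with
  | nil => rfl
  | cons u r ih => simp [fpriceD, ih]

-- the last-match foldl scan equals a first-match scan over the reversed list
theorem scan_eq_fpriceD (l : List (String × Int × String)) (p : String) (init : Int) :
    l.foldl (fun pr t => if t.1 == p then t.2.1 else pr) init = fpriceD l.reverse p init := by
  induction l generalizing init with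
  | nil => rfl
  | cons t r ih => rw [List.foldl_cons, ih, List.reverse_cons, fpriceD_append_single]

-- the dict built by A's first loop looks up the last matching price
theorem getD_foldl_insert_eq_scan (inv : List (String × Int × String))
    (d : PySem.Dict String Int) (p : String) :
    (inv.foldl (fun d t => d.insert t.1 t.2.1) d).getD p 0
      = inv.foldl (fun price t => if t.1 == p then t.2.1 else price) (d.getD p 0) := by
  induction inv generalizing d with
  | nil => rfl
  | cons t rest ih =>
      simp only [List.foldl_cons, ih]
      congr 1
      rw [PySem.Dict.getD_insert]
      rcases eq_or_ne p t.1 with h | h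
      · simp [h]
      · simp [h, beq_eq_false_iff_ne.mpr (Ne.symm h)]

theorem getD_zero_of_not_contains (d : PySem.Dict String Int) (p : String)
    (h : d.contains p = false) : d.getD p 0 = 0 := by
  simp [PySem.Dict.getD_of_not_contains, h]

-- A's purchase loop sums fpriceD over the purchase list
theorem A_eq_sum (inv : List (String × Int × String)) (items : List String) :
    store_checkout inv items = (items.map (fun p => fpriceD inv.reverse p 0)).sum := by
  unfold store_checkout
  have hstep : ∀ (total : Int) (p : String),
      (if (inv.foldl (fun d t => d.insert t.1 t.2.1) PySem.Dict.empty).contains p then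
        total + (inv.foldl (fun d t => d.insert t.1 t.2.1) PySem.Dict.empty).getD p 0
      else total) = total + fpriceD inv.reverse p 0 := by
    intro total p
    by_cases h : (inv.foldl (fun d t => d.insert t.1 t.2.1) PySem.Dict.empty).contains p = true
    · rw [if_pos h, getD_foldl_insert_eq_scan, PySem.Dict.getD_empty, scan_eq_fpriceD]
    · have h0 := getD_zero_of_not_contains _ p (by simpa using h)
      rw [getD_foldl_insert_eq_scan, PySem.Dict.getD_empty, scan_eq_fpriceD] at h0
      rw [if_neg h, h0]; omega
  calc items.foldl (fun total p =>
          if (inv.foldl (fun d t => d.insert t.1 t.2.1) PySem.Dict.empty).contains p then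
            total + (inv.foldl (fun d t => d.insert t.1 t.2.1) PySem.Dict.empty).getD p 0
          else total) 0
      = items.foldl (fun total p => total + fpriceD inv.reverse p 0) 0 := by
        have : (fun (total : Int) (p : String) =>
            if (inv.foldl (fun d t => d.insert t.1 t.2.1) PySem.Dict.empty).contains p then
              total + (inv.foldl (fun d t => d.insert t.1 t.2.1) PySem.Dict.empty).getD p 0
            else total) = fun total p => total + fpriceD inv.reverse p 0 :=
          funext fun a => funext (hstep a)
        rw [this]
    _ = 0 + (items.map (fun p => fpriceD inv.reverse p 0)).sum := PySem.List.foldl_add _ _ _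
    _ = _ := by omega

-- splitting off one name from a mapped sum: occurrences of t.1 contribute c each
theorem sum_map_split (items : List String) (n : String) (c : Int) (g : String → Int) :
    (items.map (fun p => if n == p then c else g p)).sum
      = c * (items.count n : Int) + (items.map (fun p => if n == p then 0 else g p)).sum := by
  induction items with
  | nil => simp
  | cons q r ih =>
      rcases eq_or_ne n q with h | h
      · subst h
        simp only [List.map_cons, List.sum_cons, BEq.rfl, if_pos, ih, List.count_cons_self]
        push_cast; ring
      · have hb : (n == q) = false := beq_eq_false_iff_ne.mpr h
        simp only [List.map_cons, List.sum_cons, hb, Bool.false_eq_true, if_false, ih,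
          List.count_cons_of_ne (fun hq => h hq.symm)]
        ring

-- B's loop invariant over the reversed inventory
theorem loopB_inv (items : List String) (rev : List (String × Int × String))
    (seen : PySem.Set String) (total : Int) :
    (rev.foldl
      (fun st t =>
        if st.1.contains t.1 then st
        else (st.1.add t.1, st.2 + t.2.1 * (items.count t.1 : Int)))
      (seen, total)).2
      = total + (items.map (fun p => if seen.contains p then 0 else fpriceD rev p 0)).sum := by
  induction rev generalizing seen total with
  | nil => simp [fpriceD]
  | cons t r ih =>
      simp only [List.foldl_cons]
      by_cases h : seen.contains t.1 = true
      · rw [if_pos h, ih]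
        congr 2
        refine List.map_congr_left fun p _ => ?_
        have hmem : t.1 ∈ seen := by simpa using h
        by_cases hs : p ∈ seen
        · simp [hs]
        · have hne : (t.1 == p) = false := by
            apply beq_eq_false_iff_ne.mpr
            intro he; rw [he] at hmem; exact hs hmem
          simp [hs, fpriceD, hne]
      · rw [if_neg h, ih]
        have hadd : ∀ p : String, (seen.add t.1).contains p = ((t.1 == p) || seen.contains p) := by
          intro p
          rw [Bool.eq_iff_iff]
          simp [PySem.Set.mem_add, beq_iff_eq]
          tauto
        have : (items.map (fun p => if (seen.add t.1).contains p then 0 else fpriceD r p 0)).sum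
            = (items.map (fun p => if (t.1 == p) then 0
                else if seen.contains p then 0 else fpriceD r p 0)).sum := by
          refine congrArg List.sum (List.map_congr_left fun p _ => ?_)
          rw [hadd]
          by_cases h1 : (t.1 == p) = true
          · simp [h1]
          · have h1' : ¬ t.1 = p := by simpa using h1
            by_cases h2 : p ∈ seen
            · simp [h2]
            · simp [h1', h2]
        rw [this]
        have hsplit := sum_map_split items t.1 t.2.1
          (fun p => if seen.contains p then 0 else fpriceD r p 0)
        have hmain : (items.map (fun p => if seen.contains p then 0 else fpriceD (t :: r) p 0)).sum
            = (items.map (fun p => if t.1 == p then (if seen.contains p then 0 else t.2.1)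
                else if seen.contains p then 0 else fpriceD r p 0)).sum := by
          refine congrArg List.sum (List.map_congr_left fun p _ => ?_)
          by_cases h1 : (t.1 == p) = true <;> simp [fpriceD, h1]
        have hseen_t : seen.contains t.1 = false := by simpa using h
        have hmain2 : (items.map (fun p => if t.1 == p then (if seen.contains p then 0 else t.2.1)
                else if seen.contains p then 0 else fpriceD r p 0)).sum
            = (items.map (fun p => if t.1 == p then t.2.1
                else if seen.contains p then 0 else fpriceD r p 0)).sum := by
          refine congrArg List.sum (List.map_congr_left fun p _ => ?_)
          by_cases h1 : (t.1 == p) = true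
          · have hm : p ∉ seen := by
              have he := eq_of_beq h1; rw [← he]; simpa using hseen_t
            simp [h1, hm]
          · simp [h1]
        rw [hmain, hmain2, hsplit]
        ring

-- ===== VERDICT (by name: the statement is the Claim_ definition above) =====
theorem store_checkout_spec : Claim_equal_store_checkout := by
  intro inv items _
  unfold Spec_store_checkout store_checkout_alt
  rw [A_eq_sum, loopB_inv]
  simp [PySem.Set.empty, PySem.Set.contains]
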